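-- pv_equiv track=rewrite | github.com/ian-poe/Poe_DSP539_Exam4_Python | predict_genome.py | count_next_genomes
-- ===== SOURCE A (Python) =====
-- def count_total_genomes(s, k):                                                                #Function for Frequency of Genomes in the List
--     """
--     Extracts and returns a list of unique genome substrings with a count of how many times it was seen.
--
--     This function takes a string and identifies all unique substrings of length k and a count of how many times it was seen.
--     It returns a list of unique genome substrings with a count for occurance for the original genome
--
--     Arguments:
--         s : String of the Genome Sequence.
--         k : Substring Length.
--
--     Returns:
--         A list of unique substrings of length k with count for the input sequence.
--     """
--     total_counts = {}                                                                        #Empty dictionary to Store Total Count or Each Unique Genome Substring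
--     for i in range(len(s) - k + 1):                                                          #For Loop to cycle through each genome substring of length k
--         original_substring = s[i:i + k]                                                      #Identifys Spicific substring for the loop
--
--         if original_substring not in total_counts:                                           #If Substring Not in the dictionary "total_counts"
--             total_counts[original_substring] = 0                                             #It is added with a value of 0
--
--         total_counts[original_substring] += 1                                                #1 is added to the substring count for the specific substring
--     return total_counts                                                                      #Returns the Dictionary after the string is completed
--
-- def count_next_genomes(s, k):                                                               # Function for Frequency of Next Genomes seen for each unique genome
--     """
--     Extracts and returns a list of unique genome substrings with the a count of how many times the next genome appears.
--
--     This function takes a string and identifies all unique substrings of length k.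
--     A count of how many times the next genome appears for each unique genome is created.
--     It returns a list of unique genome substrings with a frequency for next genome seen
--
--     Arguments:
--         s : String of the Genome Sequence.
--         k : Substring Length.
--
--     Returns:
--         A list of unique genome substrings with a count for which next genome is seen and how many times
--     """
--     next_genome = {}                                                            #Empty Dictionary For Frequency of Next Genomes
--     total_counts = count_total_genomes(s, k)                                    #Saved Total Count Dictionary as a Variable from the Previous Function
--     for i in range(len(s) - k):                                                 #For Loop to cycle through each genome substring of length k not including final subset
--         original_substring = s[i:i + k]
--         next_char = s[i + k]                                                    #Identify the Character Which Follows the Subset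
--         new_substring = original_substring[1:] + next_char                      #Creates a New Substring be removing the first value in the original and adding the next character
--
--         if original_substring not in next_genome:                               #If original substring not in dictionary "next_genome"
--             next_genome[original_substring] = {}                                #Substring Added with an Empty Dictionary
--
--         next_genome[original_substring][new_substring] = next_genome[original_substring].get(new_substring, 0) + 1 #Tracks the Frequency of Next Genome for Each Unique Genome Subset from the string
--     return next_genome, total_counts                                            #Returns both Dictionarys for Frequency Total and Frequency Next Genome
-- ===== SOURCE B (Python) =====
-- def count_next_genomes(s, k):
--     m = len(s) - k
--     subs = [s[i:i + k] for i in range(m + 1)]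
--     positions = {}
--     for i, t in enumerate(subs):
--         positions.setdefault(t, []).append(i)
--     total_counts = {t: len(ix) for t, ix in positions.items()}
--     next_genome = {}
--     for t, ix in positions.items():
--         succ = [subs[j][1:] + s[j + k] for j in ix if j < m]
--         if succ:
--             next_genome[t] = {u: succ.count(u) for u in dict.fromkeys(succ)}
--     return next_genome, total_counts
-- ===== Notes on version B (the rewrite author's own statement) =====
-- stated objective: alternative
-- what changed: B builds an inverted index mapping each k-mer to the list of its window positions in one grouping pass, then derives the total counts as group sizes and each successor dictionary by dedup-and-count over the group's successor list, instead of A's two passes of incremental counter-dict updates.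
import Mathlib
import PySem

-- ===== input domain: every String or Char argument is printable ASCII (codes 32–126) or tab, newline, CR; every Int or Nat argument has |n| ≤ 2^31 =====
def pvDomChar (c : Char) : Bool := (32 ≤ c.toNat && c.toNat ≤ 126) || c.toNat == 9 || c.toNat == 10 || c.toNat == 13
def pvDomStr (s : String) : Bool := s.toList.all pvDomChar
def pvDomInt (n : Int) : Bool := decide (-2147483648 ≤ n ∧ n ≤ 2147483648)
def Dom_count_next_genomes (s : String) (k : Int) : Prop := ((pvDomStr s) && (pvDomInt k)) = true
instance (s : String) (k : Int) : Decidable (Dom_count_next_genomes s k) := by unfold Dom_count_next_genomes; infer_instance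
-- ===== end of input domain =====

-- B replaces A's incremental counter dicts by an inverted index of window positions per k-mer,
-- deriving totals as group sizes and each successor dict by dedup-and-count over the group
-- (objective: alternative); return-value equivalence only (neither mutates its arguments).

-- ===== PORT A =====
-- loop body of A's helper count_total_genomes: 'if sub not in total: total[sub]=0; total[sub]+=1'
def pvAStepTotal (s : String) (k : Int) (d : PySem.Dict String Int) (i : Int) : PySem.Dict String Int :=
  let sub := PySem.Str.slice s (some i) (some (i + k))
  let d1 := if d.contains sub then d else d.insert sub 0
  d1.modify sub 0 (· + 1)

def count_total_genomes (s : String) (k : Int) : PySem.Dict String Int :=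
  (PySem.List.pyRange 0 (PySem.Str.len s - k + 1)).foldl (pvAStepTotal s k) PySem.Dict.empty

-- loop body of A's second loop; PySem.Str.pyGet? = s[i+k] (none = IndexError, excluded by Pre_)
def pvAStepNext (s : String) (k : Int) (d : PySem.Dict String (PySem.Dict String Int)) (i : Int) :
    PySem.Dict String (PySem.Dict String Int) :=
  let sub := PySem.Str.slice s (some i) (some (i + k))
  match PySem.Str.pyGet? s (i + k) with
  | none => d
  | some c =>
    let newSub := PySem.Str.slice sub (some 1) none ++ String.singleton c
    let d1 := if d.contains sub then d else d.insert sub PySem.Dict.empty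
    d1.modify sub PySem.Dict.empty (fun inner => inner.insert newSub (inner.getD newSub 0 + 1))

def count_next_genomes (s : String) (k : Int) : (List (String × List (String × Int))) × (List (String × Int)) :=
  let total := count_total_genomes s k
  let next := (PySem.List.pyRange 0 (PySem.Str.len s - k)).foldl (pvAStepNext s k) PySem.Dict.empty
  (next.items.map (fun p => (p.1, p.2.items)), total.items)

-- ===== PORT B =====
-- 'subs = [s[i:i+k] for i in range(m+1)]'
def pvBsubs (s : String) (k : Int) : List String :=
  (PySem.List.pyRange 0 (PySem.Str.len s - k + 1)).map
    (fun i => PySem.Str.slice s (some i) (some (i + k)))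

-- 'for i, t in enumerate(subs): positions.setdefault(t, []).append(i)'  (net effect: positions[t] = positions.get(t, []) + [i])
def pvBpositions (s : String) (k : Int) : PySem.Dict String (List Int) :=
  ((PySem.List.enumerate (pvBsubs s k)).map (fun p => (p.2, p.1))).foldl
    (fun d p => d.modify p.1 [] (fun l => l ++ [p.2])) PySem.Dict.empty

-- 'succ = [subs[j][1:] + s[j + k] for j in ix if j < m]'; pyGet? = s[j+k] (none = IndexError, excluded by Pre_)
def pvBsucc (s : String) (k : Int) (subs : List String) (ix : List Int) : List String :=
  (ix.filter (fun j => j < PySem.Str.len s - k)).filterMap (fun j =>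
    (PySem.Str.pyGet? s (j + k)).map (fun c =>
      PySem.Str.slice (PySem.List.pyGetD subs j "") (some 1) none ++ String.singleton c))

def count_next_genomes_alt (s : String) (k : Int) : (List (String × List (String × Int))) × (List (String × Int)) :=
  let subs := pvBsubs s k
  let positions := pvBpositions s k
  let total := positions.items.map (fun p => (p.1, (p.2.length : Int)))
  let next := positions.items.filterMap (fun p =>
    let succ := pvBsucc s k subs p.2
    if succ.isEmpty then none
    else some (p.1, (PySem.List.dedup succ).map (fun u => (u, (succ.count u : Int)))))
  (next, total)

-- ===== PRECONDITION & SPEC =====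
-- Pre_ excludes exactly k < -len(s), where Python A raises IndexError at s[i+k] (B raises there too).
def Pre_count_next_genomes (s : String) (k : Int) : Prop := -(PySem.Str.len s) ≤ k
instance (s : String) (k : Int) : Decidable (Pre_count_next_genomes s k) := by
  unfold Pre_count_next_genomes; infer_instance

def pvWitness_count_next_genomes : String × Int := ("ACGTAC", 2)

def Spec_count_next_genomes (s : String) (k : Int)
    (out : (List (String × List (String × Int))) × (List (String × Int))) : Prop :=
  out = count_next_genomes_alt s k
instance (s : String) (k : Int) (out : (List (String × List (String × Int))) × (List (String × Int))) :
    Decidable (Spec_count_next_genomes s k out) := by unfold Spec_count_next_genomes; infer_instance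

-- ===== CLAIM (what is proved, stated in full; the proofs are below) =====
def Claim_equal_count_next_genomes : Prop := ∀ (s : String) (k : Int),
  Dom_count_next_genomes s k → Pre_count_next_genomes s k →
  Spec_count_next_genomes s k (count_next_genomes s k)

-- ===== LEMMAS AND PROOFS =====

-- the k-mer starting at position i, and its successor string
def pvKey (s : String) (k i : Int) : String := PySem.Str.slice s (some i) (some (i + k))
def pvNew (s : String) (k i : Int) : String :=
  PySem.Str.slice (pvKey s k i) (some 1) none ++
    String.singleton ((PySem.Str.pyGet? s (i + k)).getD 'A')

-- A's nested counter step on a (key, successor) pair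
def pvF (d : PySem.Dict String (PySem.Dict String Int)) (p : String × String) :
    PySem.Dict String (PySem.Dict String Int) :=
  d.modify p.1 PySem.Dict.empty (fun inner => inner.modify p.2 0 (· + 1))

-- under Pre_, every index i+k with 0 ≤ i < len s - k is in range
theorem pvGet_isSome (s : String) (k i : Int) (hpre : -(PySem.Str.len s) ≤ k)
    (h0 : 0 ≤ i) (h1 : i < PySem.Str.len s - k) :
    ∃ c, PySem.Str.pyGet? s (i + k) = some c := by
  rcases h : PySem.Str.pyGet? s (i + k) with _ | c
  · exfalso
    have hn := (PySem.List.pyGet?_eq_none_iff s.toList (i + k)).mp h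
    have hl := PySem.Str.len_eq s
    simp only [PySem.Raise.InRange] at hn
    omega
  · exact ⟨c, rfl⟩

-- A's guarded total step is a plain counter step on the key
theorem pvAStepTotal_eq_modify (s : String) (k : Int) (d : PySem.Dict String Int) (i : Int) :
    pvAStepTotal s k d i = d.modify (pvKey s k i) 0 (· + 1) := by
  simp only [pvAStepTotal, pvKey]
  by_cases h : d.contains (PySem.Str.slice s (some i) (some (i + k)))
  · simp [h]
  · have h' : d.contains (PySem.Str.slice s (some i) (some (i + k))) = false := by simpa using h
    simp only [h', Bool.false_eq_true, if_false]
    simp [PySem.Dict.modify, PySem.Dict.getD_insert_self, PySem.Dict.insert_insert_self,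
      PySem.Dict.getD_of_not_contains d 0 h']

-- A's total dict is Counter(subs)
theorem pvATotal_eq_counter (s : String) (k : Int) :
    count_total_genomes s k = PySem.Dict.counter (pvBsubs s k) := by
  unfold count_total_genomes pvBsubs
  rw [PySem.Dict.counter_eq_foldl, List.foldl_map]
  exact PySem.List.foldl_congr_mem _ _ _ _
    (fun acc x _ => pvAStepTotal_eq_modify s k acc x)

-- A's guarded next step is one nested-modify step (given the successor char exists)
theorem pvAStepNext_eq_modify (s : String) (k : Int) (d : PySem.Dict String (PySem.Dict String Int))
    (i : Int) (hc : ∃ c, PySem.Str.pyGet? s (i + k) = some c) :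
    pvAStepNext s k d i = pvF d (pvKey s k i, pvNew s k i) := by
  obtain ⟨c, hcc⟩ := hc
  simp only [pvAStepNext, pvF, pvNew, pvKey, hcc, Option.getD_some]
  by_cases h : d.contains (PySem.Str.slice s (some i) (some (i + k)))
  · simp [h, PySem.Dict.modify]
  · have h' : d.contains (PySem.Str.slice s (some i) (some (i + k))) = false := by simpa using h
    simp only [h', Bool.false_eq_true, if_false]
    simp [PySem.Dict.modify, PySem.Dict.getD_insert_self, PySem.Dict.insert_insert_self,
      PySem.Dict.getD_of_not_contains d PySem.Dict.empty h']

-- getD through the nested fold groups the second components by key and counts them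
theorem pvNestedFold_getD (l : List (String × String)) (d : PySem.Dict String (PySem.Dict String Int))
    (t : String) :
    (l.foldl pvF d).getD t PySem.Dict.empty =
      ((l.filter (fun p => p.1 == t)).map (·.2)).foldl
        (fun inner u => inner.modify u 0 (· + 1)) (d.getD t PySem.Dict.empty) := by
  induction l generalizing d with
  | nil => simp
  | cons p l ih =>
    rw [List.foldl_cons, ih]
    by_cases h : p.1 = t
    · simp [pvF, h]
    · simp [pvF, h, PySem.Dict.getD_modify, Ne.symm h]

-- enumerate of a map over a range starting at the same value pairs each index with its image
theorem pvEnumerate_map_range (g : Nat → String) (n : Nat) (a : Int) :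
    PySem.List.enumerate ((List.range n).map g) a =
      (List.range n).map (fun (j : Nat) => (a + (j : Int), g j)) := by
  induction n with
  | zero => simp [PySem.List.enumerate_nil]
  | succ n ih =>
    rw [List.range_succ, List.map_append, PySem.List.enumerate_append, ih, List.map_append]
    simp [PySem.List.enumerate_cons, PySem.List.enumerate_nil]

theorem pvEnumerate_map_pyRange (f : Int → String) (b : Int) :
    PySem.List.enumerate ((PySem.List.pyRange 0 b).map f) 0 =
      (PySem.List.pyRange 0 b).map (fun i => (i, f i)) := by
  rw [PySem.List.pyRange_one 0 b]
  simp only [List.map_map, Function.comp_def]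
  rw [pvEnumerate_map_range (fun j : Nat => f (0 + (j : Int))) ((b - 0).toNat) 0]

-- Set.ofList of a list with one appended element
theorem pvOfList_append_singleton (l : List String) (a : String) :
    PySem.Set.ofList (l ++ [a]) = PySem.Set.add (PySem.Set.ofList l) a := by
  rw [PySem.Set.ofList_eq_foldl, List.foldl_append]
  simp [← PySem.Set.ofList_eq_foldl]

-- B's group of positions for t is the filtered 0-based range
theorem pvPositions_getD (s : String) (k : Int) (t : String) :
    (pvBpositions s k).getD t [] =
      (PySem.List.pyRange 0 (PySem.Str.len s - k + 1)).filter (fun j => pvKey s k j == t) := by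
  unfold pvBpositions pvBsubs
  rw [PySem.Dict.getD_foldl_modify_append]
  rw [pvEnumerate_map_pyRange (fun i => PySem.Str.slice s (some i) (some (i + k)))]
  rw [List.map_map, List.filter_map, List.map_map]
  simp [PySem.Dict.getD_empty, Function.comp_def, pvKey]

-- B's keys
-- the second components of an enumeration are the original list
theorem pvEnumerate_map_snd (xs : List String) (n : Int) :
    ((PySem.List.enumerate xs n).map (fun p => (p.2, p.1))).map
      (fun (p : String × Int) => p.1) = xs := by
  induction xs generalizing n with
  | nil => simp [PySem.List.enumerate_nil]
  | cons x xs ih => simp [PySem.List.enumerate_cons, ih]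

theorem pvPositions_keys (s : String) (k : Int) :
    (pvBpositions s k).keys = PySem.Set.ofList (pvBsubs s k) := by
  refine (PySem.Dict.keys_foldl_modify_key _ (fun (p : String × Int) => p.1) []
    (fun (_ : PySem.Dict String (List Int)) (p : String × Int) (l : List Int) => l ++ [p.2])
    PySem.Dict.empty).trans ?_
  exact congrArg PySem.Set.ofList (pvEnumerate_map_snd (pvBsubs s k) 0)

theorem pvPositions_nodup (s : String) (k : Int) : (pvBpositions s k).keys.Nodup := by
  exact PySem.Dict.nodup_keys_foldl_modify_key _ (fun (p : String × Int) => p.1) []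
    (fun (_ : PySem.Dict String (List Int)) (p : String × Int) (l : List Int) => l ++ [p.2])
    PySem.Dict.empty List.nodup_nil

-- subs looked up at an in-range index is the k-mer there
theorem pvSubs_getD (s : String) (k j : Int) (h0 : 0 ≤ j) (h1 : j < PySem.Str.len s - k + 1) :
    PySem.List.pyGetD (pvBsubs s k) j "" = pvKey s k j := by
  have h1' : (((PySem.Str.len s - k + 1).toNat : Nat) : Int) = PySem.Str.len s - k + 1 :=
    Int.toNat_of_nonneg (by omega)
  have h2 : ((j.toNat : Nat) : Int) = j := Int.toNat_of_nonneg h0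
  unfold pvBsubs
  rw [← h1', ← h2]
  exact PySem.List.pyGetD_map_pyRange (fun i => PySem.Str.slice s (some i) (some (i + k)))
    (PySem.Str.len s - k + 1).toNat j.toNat "" (by omega)

-- B's successor list for t's group is A's follower list for t
theorem pvSucc_eq_followers (s : String) (k : Int) (t : String)
    (hpre : -(PySem.Str.len s) ≤ k) :
    pvBsucc s k (pvBsubs s k) ((pvBpositions s k).getD t []) =
      ((PySem.List.pyRange 0 (PySem.Str.len s - k)).filter (fun j => pvKey s k j == t)).map
        (pvNew s k) := by
  rw [pvPositions_getD]
  unfold pvBsucc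
  have hrange : (PySem.List.pyRange 0 (PySem.Str.len s - k + 1)).filter
      (fun j => decide (j < PySem.Str.len s - k)) =
        PySem.List.pyRange 0 (PySem.Str.len s - k) := by
    rcases (by omega : 0 ≤ PySem.Str.len s - k ∨ PySem.Str.len s - k < 0) with h0 | h0
    · rw [PySem.List.pyRange_one_succ_right h0, List.filter_append]
      have h2 : [PySem.Str.len s - k].filter (fun j => decide (j < PySem.Str.len s - k)) = [] := by
        simp
      have h3 : (PySem.List.pyRange 0 (PySem.Str.len s - k)).filter
          (fun j => decide (j < PySem.Str.len s - k)) =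
            PySem.List.pyRange 0 (PySem.Str.len s - k) := by
        refine List.filter_eq_self.mpr (fun j hj => ?_)
        simpa using (PySem.List.mem_pyRange_one.mp hj).2
      rw [h2, h3, List.append_nil]
    · have hsl : PySem.Str.len s = ((s.length : Int)) := rfl
      have e1 : (((s.length : Int)) - k + 1).toNat = 0 := by omega
      have e2 : (((s.length : Int)) - k).toNat = 0 := by omega
      simp [PySem.List.pyRange_one, e1, e2]
  rw [List.filter_comm, hrange]
  have hcong : ∀ j ∈ (PySem.List.pyRange 0 (PySem.Str.len s - k)).filter
      (fun j => pvKey s k j == t),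
      (PySem.Str.pyGet? s (j + k)).map (fun c =>
        PySem.Str.slice (PySem.List.pyGetD (pvBsubs s k) j "") (some 1) none ++
          String.singleton c) = (some ∘ pvNew s k) j := by
    intro j hj
    have hjr := PySem.List.mem_pyRange_one.mp (List.mem_filter.mp hj).1
    obtain ⟨c, hc⟩ := pvGet_isSome s k j hpre hjr.1 hjr.2
    have hc' : PySem.List.pyGet? s.toList (j + k) = some c := hc
    rw [hc, pvSubs_getD s k j hjr.1 (by omega)]
    simp [pvNew, hc']
  rw [List.filterMap_congr hcong, List.filterMap_eq_map]

-- 'if nonempty then keep' filterMap is a filter-then-map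
theorem pvFilterMap_if {α : Type} (l : List String) (P : String → Bool) (h : String → α) :
    l.filterMap (fun t => if P t then none else some (h t)) =
      (l.filter (fun t => !P t)).map h := by
  induction l with
  | nil => rfl
  | cons x xs ih => rcases hx : P x <;> simp [hx, ih]

-- A's transition pairs
def pvPs (s : String) (k : Int) : List (String × String) :=
  (PySem.List.pyRange 0 (PySem.Str.len s - k)).map (fun i => (pvKey s k i, pvNew s k i))

-- A's follower list for t
def pvFl (s : String) (k : Int) (t : String) : List String :=
  ((PySem.List.pyRange 0 (PySem.Str.len s - k)).filter (fun j => pvKey s k j == t)).map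
    (pvNew s k)

-- A's next-genome fold is the nested counter fold over the pairs
theorem pvAFold_eq (s : String) (k : Int) (hpre : -(PySem.Str.len s) ≤ k) :
    (PySem.List.pyRange 0 (PySem.Str.len s - k)).foldl (pvAStepNext s k) PySem.Dict.empty =
      (pvPs s k).foldl pvF PySem.Dict.empty := by
  unfold pvPs
  rw [List.foldl_map]
  exact PySem.List.foldl_congr_mem _ _ _ _ (fun acc i hi => by
    have hir := PySem.List.mem_pyRange_one.mp hi
    exact pvAStepNext_eq_modify s k acc i (pvGet_isSome s k i hpre hir.1 hir.2))

theorem pvPs_map_fst (s : String) (k : Int) :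
    (pvPs s k).map (fun p => p.1) =
      (PySem.List.pyRange 0 (PySem.Str.len s - k)).map (pvKey s k) := by
  unfold pvPs; rw [List.map_map]; rfl

theorem pvAKeys (s : String) (k : Int) :
    ((pvPs s k).foldl pvF PySem.Dict.empty).keys =
      PySem.Set.ofList ((PySem.List.pyRange 0 (PySem.Str.len s - k)).map (pvKey s k)) := by
  refine (PySem.Dict.keys_foldl_modify_key _ (fun (p : String × String) => p.1) PySem.Dict.empty
    (fun (_ : PySem.Dict String (PySem.Dict String Int)) (p : String × String)
      (inner : PySem.Dict String Int) => inner.modify p.2 0 (· + 1)) PySem.Dict.empty).trans ?_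
  exact congrArg PySem.Set.ofList (pvPs_map_fst s k)

theorem pvANodup (s : String) (k : Int) :
    ((pvPs s k).foldl pvF PySem.Dict.empty).keys.Nodup := by
  exact PySem.Dict.nodup_keys_foldl_modify_key _ (fun (p : String × String) => p.1)
    PySem.Dict.empty
    (fun (_ : PySem.Dict String (PySem.Dict String Int)) (p : String × String)
      (inner : PySem.Dict String Int) => inner.modify p.2 0 (· + 1)) PySem.Dict.empty
    List.nodup_nil

-- the nested fold's value at t is Counter of t's followers
theorem pvAGetD (s : String) (k : Int) (t : String) :
    ((pvPs s k).foldl pvF PySem.Dict.empty).getD t PySem.Dict.empty =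
      PySem.Dict.counter (pvFl s k t) := by
  rw [pvNestedFold_getD, PySem.Dict.counter_eq_foldl, PySem.Dict.getD_empty]
  congr 1
  unfold pvPs pvFl
  rw [List.filter_map, List.map_map]
  rfl

-- t has a follower iff it is one of the first m k-mers
theorem pvFl_isEmpty (s : String) (k : Int) (t : String) :
    (pvFl s k t).isEmpty =
      !decide (t ∈ (PySem.List.pyRange 0 (PySem.Str.len s - k)).map (pvKey s k)) := by
  unfold pvFl
  by_cases hmem : t ∈ (PySem.List.pyRange 0 (PySem.Str.len s - k)).map (pvKey s k)
  · simp only [hmem, decide_true, Bool.not_true]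
    rw [List.isEmpty_eq_false_iff]
    simp only [ne_eq, List.map_eq_nil_iff, List.filter_eq_nil_iff]
    intro hall
    obtain ⟨j, hj, hjt⟩ := List.mem_map.mp hmem
    exact absurd hjt (by simpa using hall j hj)
  · simp only [hmem, decide_false, Bool.not_false, List.isEmpty_iff, List.map_eq_nil_iff,
      List.filter_eq_nil_iff]
    intro j hj
    simp only [beq_iff_eq]
    exact fun h => hmem (List.mem_map.mpr ⟨j, hj, h⟩)

-- B's kept keys are exactly A's keys
theorem pvKeys_filter (s : String) (k : Int) :
    (PySem.Set.ofList (pvBsubs s k)).filter (fun t => !(pvFl s k t).isEmpty) =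
      PySem.Set.ofList ((PySem.List.pyRange 0 (PySem.Str.len s - k)).map (pvKey s k)) := by
  have hpred : ∀ t, (!(pvFl s k t).isEmpty) =
      decide (t ∈ (PySem.List.pyRange 0 (PySem.Str.len s - k)).map (pvKey s k)) := by
    intro t; rw [pvFl_isEmpty, Bool.not_not]
  rcases (by omega : 0 ≤ PySem.Str.len s - k ∨ PySem.Str.len s - k < 0) with h0 | h0
  · have hsubs : pvBsubs s k =
        (PySem.List.pyRange 0 (PySem.Str.len s - k)).map (pvKey s k) ++
          [pvKey s k (PySem.Str.len s - k)] := by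
      unfold pvBsubs
      rw [PySem.List.pyRange_one_succ_right h0, List.map_append]
      rfl
    set l1 := (PySem.List.pyRange 0 (PySem.Str.len s - k)).map (pvKey s k) with hl1
    have hself : (PySem.Set.ofList l1).filter (fun t => !(pvFl s k t).isEmpty) =
        PySem.Set.ofList l1 := by
      refine List.filter_eq_self.mpr (fun t ht => ?_)
      rw [hpred]
      exact decide_eq_true ((PySem.Set.mem_ofList l1 t).mp ht)
    rw [hsubs, pvOfList_append_singleton]
    rw [show (PySem.Set.ofList l1).add (pvKey s k (PySem.Str.len s - k)) =
        (if (PySem.Set.ofList l1).contains (pvKey s k (PySem.Str.len s - k)) then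
          PySem.Set.ofList l1 else PySem.Set.ofList l1 ++ [pvKey s k (PySem.Str.len s - k)])
        from rfl]
    by_cases hc : (PySem.Set.ofList l1).contains (pvKey s k (PySem.Str.len s - k)) = true
    · rw [if_pos hc]; exact hself
    · rw [if_neg hc, List.filter_append, hself]
      have hnm : pvKey s k (PySem.Str.len s - k) ∉ l1 := by
        intro hmem
        exact hc (by
          have := (PySem.Set.mem_ofList l1 (pvKey s k (PySem.Str.len s - k))).mpr hmem
          rwa [PySem.Set.contains_iff])
      have hf : (!(pvFl s k (pvKey s k (PySem.Str.len s - k))).isEmpty) = false := by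
        rw [hpred]; exact decide_eq_false hnm
      rw [List.filter_singleton]
      have htrue : (pvFl s k (pvKey s k (((s.length : Int)) - k))).isEmpty = true := by
        simpa using hf
      simp [htrue]
  · have hsl : PySem.Str.len s = ((s.length : Int)) := rfl
    have e1 : (((s.length : Int)) - k + 1).toNat = 0 := by omega
    have e2 : (((s.length : Int)) - k).toNat = 0 := by omega
    unfold pvBsubs
    simp [PySem.List.pyRange_one, e1, e2, PySem.Set.ofList]

-- ===== VERDICT (by name: the statement is the Claim_ definition above) =====
theorem count_next_genomes_spec : Claim_equal_count_next_genomes := by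
  intro s k _ hpre
  unfold Spec_count_next_genomes count_next_genomes count_next_genomes_alt
  have htotal : (count_total_genomes s k).items =
      (pvBpositions s k).items.map (fun p => (p.1, (p.2.length : Int))) := by
    rw [pvATotal_eq_counter, PySem.Dict.items_counter]
    rw [PySem.Dict.items_eq_map_keys (pvBpositions s k) (pvPositions_nodup s k) []]
    rw [List.map_map, pvPositions_keys]
    refine List.map_congr_left (fun t ht => ?_)
    simp only [Function.comp_def]
    rw [pvPositions_getD]
    have hcnt : (pvBsubs s k).count t =
        ((PySem.List.pyRange 0 (PySem.Str.len s - k + 1)).filter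
          (fun j => pvKey s k j == t)).length := by
      rw [← List.countP_eq_length_filter, List.count_eq_countP]
      unfold pvBsubs
      rw [List.countP_map]
      rfl
    rw [hcnt]
  have hsuccB : ∀ t, pvBsucc s k (pvBsubs s k) ((pvBpositions s k).getD t []) = pvFl s k t :=
    fun t => pvSucc_eq_followers s k t hpre
  have hnext : (((PySem.List.pyRange 0 (PySem.Str.len s - k)).foldl (pvAStepNext s k)
      PySem.Dict.empty).items).map (fun p => (p.1, p.2.items)) =
      (pvBpositions s k).items.filterMap (fun p =>
        if (pvBsucc s k (pvBsubs s k) p.2).isEmpty then none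
        else some (p.1, (PySem.List.dedup (pvBsucc s k (pvBsubs s k) p.2)).map
          (fun u => (u, ((pvBsucc s k (pvBsubs s k) p.2).count u : Int))))) := by
    rw [pvAFold_eq s k hpre]
    rw [PySem.Dict.items_eq_map_keys _ (pvANodup s k) PySem.Dict.empty, List.map_map, pvAKeys]
    rw [PySem.Dict.items_eq_map_keys (pvBpositions s k) (pvPositions_nodup s k) [],
      List.filterMap_map, pvPositions_keys]
    have hrw : ∀ t ∈ PySem.Set.ofList (pvBsubs s k),
        ((fun p : String × List Int =>
            if (pvBsucc s k (pvBsubs s k) p.2).isEmpty then none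
            else some (p.1, (PySem.List.dedup (pvBsucc s k (pvBsubs s k) p.2)).map
              (fun u => (u, ((pvBsucc s k (pvBsubs s k) p.2).count u : Int))))) ∘
          (fun t => (t, (pvBpositions s k).getD t []))) t =
        (fun t => if (pvFl s k t).isEmpty then none
          else some (t, (PySem.List.dedup (pvFl s k t)).map
            (fun u => (u, ((pvFl s k t).count u : Int))))) t := by
      intro t _
      simp only [Function.comp_def, hsuccB t]
    rw [List.filterMap_congr hrw]
    rw [pvFilterMap_if (PySem.Set.ofList (pvBsubs s k)) (fun t => (pvFl s k t).isEmpty)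
      (fun t => (t, (PySem.List.dedup (pvFl s k t)).map
        (fun u => (u, ((pvFl s k t).count u : Int)))))]
    rw [pvKeys_filter s k]
    refine List.map_congr_left (fun t ht => ?_)
    simp only [Function.comp_def]
    rw [pvAGetD s k t, PySem.Dict.items_counter, PySem.List.dedup_eq_ofList]
  exact congrArg₂ Prod.mk hnext htotal
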